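-- pv_equiv track=rewrite | github.com/huggingface/transformers | src/transformers/tokenization_tapas_utilities.py | get_all_spans
-- ===== SOURCE A (Python) =====
-- def get_all_spans(text,
--                   max_ngram_length):
--   """Split a text into all possible ngrams up to 'max_ngram_length'.
--   Split points are white space and punctuation.
--   Args:
--     text: Text to split.
--     max_ngram_length: maximal ngram length.
--   Yields:
--     Spans, tuples of begin-end index.
--   """
--   start_indexes = []
--   for index, char in enumerate(text):
--     if not char.isalnum():
--       continue
--     if index == 0 or not text[index - 1].isalnum():
--       start_indexes.append(index)
--     if index + 1 == len(text) or not text[index + 1].isalnum():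
--       for start_index in start_indexes[-max_ngram_length:]:
--         yield start_index, index + 1
-- ===== SOURCE B (Python) =====
-- def get_all_spans(text, max_ngram_length):
--   """Two-pass variant: collect word (begin, end) spans first, then emit
--   ngram spans per end word from the trailing slice of collected begins."""
--   n = len(text)
--   spans = []
--   i = 0
--   while i < n:
--     if not text[i].isalnum():
--       i += 1
--       continue
--     j = i + 1
--     while j < n and text[j].isalnum():
--       j += 1
--     spans.append((i, j))
--     i = j
--   word_begins = [begin for begin, _ in spans]
--   for k, (_, end) in enumerate(spans):
--     for start in word_begins[:k + 1][-max_ngram_length:]: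
--       yield start, end
-- ===== Notes on version B (the rewrite author's own statement) =====
-- stated objective: faster
-- what changed: B splits A's single interleaved scan into two passes: one pass collects word (begin,end) spans with a tight inner run scan, then a second pass emits, for each end word, the ngram spans from the trailing slice word_begins[:k+1][-max_ngram_length:], instead of maintaining start_indexes and testing boundary conditions inside a per-character enumerate loop.
import Mathlib
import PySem

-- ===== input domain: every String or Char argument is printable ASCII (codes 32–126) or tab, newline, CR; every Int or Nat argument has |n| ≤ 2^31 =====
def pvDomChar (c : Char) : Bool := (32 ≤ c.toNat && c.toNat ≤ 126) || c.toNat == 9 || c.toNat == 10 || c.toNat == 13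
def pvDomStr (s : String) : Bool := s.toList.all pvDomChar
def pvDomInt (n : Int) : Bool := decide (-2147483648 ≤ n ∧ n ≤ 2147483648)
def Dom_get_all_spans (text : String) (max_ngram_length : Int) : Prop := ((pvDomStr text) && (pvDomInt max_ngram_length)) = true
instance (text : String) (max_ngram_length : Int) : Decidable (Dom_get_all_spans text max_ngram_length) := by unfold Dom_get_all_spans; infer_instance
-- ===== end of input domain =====

-- B replaces A's single interleaved scan with two passes — collect word (begin,end)
-- spans, then emit each end word's ngrams from a trailing slice of the begins —
-- a constant-factor win measured (objective: faster).

-- ===== PORT A =====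
-- One step of A's `for index, char in enumerate(text)` loop body; state = (start_indexes, yielded)
def pvStepA (cs : List Char) (m : Int) (st : List Int × List (Int × Int)) (p : Int × Char)
    : List Int × List (Int × Int) :=
  if !(PySem.Chars.isalnum p.2) then st
  else
    let start_indexes :=
      if (p.1 == 0) || !(PySem.Chars.isalnum (PySem.List.pyGetD cs (p.1 - 1) ' ')) then
        st.1 ++ [p.1] else st.1
    let out :=
      if (p.1 + 1 == (cs.length : Int)) || !(PySem.Chars.isalnum (PySem.List.pyGetD cs (p.1 + 1) ' ')) then
        st.2 ++ (PySem.List.slice start_indexes (some (-m)) none).map (fun s => (s, p.1 + 1))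
      else st.2
    (start_indexes, out)

def get_all_spans (text : String) (max_ngram_length : Int) : List (Int × Int) :=
  let cs := text.toList
  ((PySem.List.enumerate cs 0).foldl (pvStepA cs max_ngram_length) ([], [])).2

-- ===== PORT B =====
-- Source B's inner `while j < n and text[j].isalnum(): j += 1` scan: returns (j, rest after the run)
def pvRunEnd (rest : List Char) (j : Int) : Int × List Char :=
  match rest with
  | [] => (j, [])
  | c :: cs => if PySem.Chars.isalnum c then pvRunEnd cs (j + 1) else (j, c :: cs)

theorem pvRunEnd_len_le (rest : List Char) (j : Int) : (pvRunEnd rest j).2.length ≤ rest.length := by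
  induction rest generalizing j with
  | nil => simp [pvRunEnd]
  | cons c cs ih =>
    simp only [pvRunEnd]
    split
    · exact le_trans (ih (j + 1)) (by simp)
    · simp

-- Source B's outer while loop collecting word spans (begin, end)
def pvWordsB (cs : List Char) (i : Int) : List (Int × Int) :=
  match h : cs with
  | [] => []
  | c :: rest =>
    if PySem.Chars.isalnum c then
      let p := pvRunEnd rest (i + 1)
      (i, p.1) :: pvWordsB p.2 p.1
    else pvWordsB rest (i + 1)
termination_by cs.length
decreasing_by
  · exact Nat.lt_succ_of_le (pvRunEnd_len_le rest (i + 1))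
  · simp

def get_all_spans_alt (text : String) (max_ngram_length : Int) : List (Int × Int) :=
  let spans := pvWordsB text.toList 0
  let word_begins := spans.map (·.1)
  (PySem.List.enumerate spans 0).foldl
    (fun out p =>
      out ++ (PySem.List.slice (PySem.List.slice word_begins none (some (p.1 + 1)))
                (some (-max_ngram_length)) none).map (fun s => (s, p.2.2)))
    []

-- ===== PRECONDITION & SPEC =====
def Spec_get_all_spans (text : String) (max_ngram_length : Int) (out : List (Int × Int)) : Prop := out = get_all_spans_alt text max_ngram_length
instance (text : String) (max_ngram_length : Int) (out : List (Int × Int)) : Decidable (Spec_get_all_spans text max_ngram_length out) := by unfold Spec_get_all_spans; infer_instance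

-- ===== CLAIM (what is proved, stated in full; the proofs are below) =====
def Claim_equal_get_all_spans : Prop := ∀ (text : String) (max_ngram_length : Int), Dom_get_all_spans text max_ngram_length → Spec_get_all_spans text max_ngram_length (get_all_spans text max_ngram_length)

-- ===== LEMMAS AND PROOFS =====

-- ngrams emitted at one word end j, from the trailing slice of collected begins
def pvEmit (m : Int) (starts : List Int) (j : Int) : List (Int × Int) :=
  (PySem.List.slice starts (some (-m)) none).map (fun s => (s, j))

-- A's loop re-expressed structurally: `prev` is the previous character (none at index 0)
def pvLoopA (m : Int) (prev : Option Char) (cs : List Char) (i : Int)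
    (starts : List Int) (out : List (Int × Int)) : List Int × List (Int × Int) :=
  match cs with
  | [] => (starts, out)
  | c :: rest =>
    if !(PySem.Chars.isalnum c) then pvLoopA m (some c) rest (i + 1) starts out
    else
      let starts' := if (match prev with | none => true | some q => !(PySem.Chars.isalnum q))
                     then starts ++ [i] else starts
      let out' := if (match rest with | [] => true | r :: _ => !(PySem.Chars.isalnum r))
                  then out ++ pvEmit m starts' (i + 1) else out
      pvLoopA m (some c) rest (i + 1) starts' out'

-- emission collected over a word list, threading the accumulated begins
def pvEmitFrom (m : Int) (starts : List Int) : List (Int × Int) → List (Int × Int)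
  | [] => []
  | (b, e) :: ws => pvEmit m (starts ++ [b]) e ++ pvEmitFrom m (starts ++ [b]) ws

-- what pvLoopA still emits, depending on whether we are mid-word (prev alnum)
def pvRHS (m : Int) (prev : Option Char) (cs : List Char) (i : Int) (starts : List Int) : List (Int × Int) :=
  match prev with
  | some p =>
    if PySem.Chars.isalnum p then
      match cs with
      | [] => []
      | c :: _ =>
        if PySem.Chars.isalnum c then
          pvEmit m starts (pvRunEnd cs i).1 ++
            pvEmitFrom m starts (pvWordsB (pvRunEnd cs i).2 (pvRunEnd cs i).1)
        else pvEmitFrom m starts (pvWordsB cs i)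
    else pvEmitFrom m starts (pvWordsB cs i)
  | none => pvEmitFrom m starts (pvWordsB cs i)

theorem pvLoopA_eq (m : Int) (cs : List Char) : ∀ (prev : Option Char) (i : Int)
    (starts : List Int) (out : List (Int × Int)),
    (pvLoopA m prev cs i starts out).2 = out ++ pvRHS m prev cs i starts := by
  induction cs with
  | nil =>
    intro prev i starts out
    cases prev with
    | none => simp [pvLoopA, pvRHS, pvWordsB, pvEmitFrom]
    | some p =>
      by_cases hp : PySem.Chars.isalnum p <;>
        simp [pvLoopA, pvRHS, pvWordsB, pvEmitFrom, hp]
  | cons c rest ih =>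
    intro prev i starts out
    by_cases hc : PySem.Chars.isalnum c
    · -- alnum current char
      cases prev with
      | none =>
        -- word start
        simp only [pvLoopA, hc, Bool.not_true, Bool.false_eq_true, if_false, ih]
        cases rest with
        | nil =>
          simp [pvRHS, pvWordsB, pvRunEnd, pvEmitFrom, hc]
        | cons r rest2 =>
          by_cases hr : PySem.Chars.isalnum r <;>
            simp [pvRHS, pvWordsB, pvRunEnd, pvEmitFrom, hc, hr, List.append_assoc]
      | some p =>
        by_cases hp : PySem.Chars.isalnum p
        · -- mid-word
          simp only [pvLoopA, hc, Bool.not_true, Bool.false_eq_true, if_false, ih, hp]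
          cases rest with
          | nil =>
            simp [pvRHS, pvWordsB, pvRunEnd, pvEmitFrom, hc, hp]
          | cons r rest2 =>
            by_cases hr : PySem.Chars.isalnum r <;>
              simp [pvRHS, pvWordsB, pvRunEnd, pvEmitFrom, hc, hp, hr, List.append_assoc]
        · -- word start after a non-alnum char
          simp only [pvLoopA, hc, Bool.not_true, Bool.false_eq_true, if_false, ih, hp]
          cases rest with
          | nil =>
            simp [pvRHS, pvWordsB, pvRunEnd, pvEmitFrom, hc, hp]
          | cons r rest2 =>
            by_cases hr : PySem.Chars.isalnum r <;>
              simp [pvRHS, pvWordsB, pvRunEnd, pvEmitFrom, hc, hp, hr, List.append_assoc]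
    · -- non-alnum char: skipped by both
      cases prev with
      | none => simp [pvLoopA, pvRHS, pvWordsB, hc, ih]
      | some p =>
        by_cases hp : PySem.Chars.isalnum p <;>
          simp [pvLoopA, pvRHS, pvWordsB, hc, hp, ih]

-- Bridge: one step of A's foldl equals one step of pvLoopA
theorem pvStepA_eq (m : Int) (pre : List Char) (c : Char) (rest : List Char)
    (starts : List Int) (out : List (Int × Int)) :
    pvStepA (pre ++ c :: rest) m (starts, out) ((pre.length : Int), c) =
      (if !(PySem.Chars.isalnum c) then (starts, out)
       else
         let starts' := if (match pre.getLast? with | none => true | some q => !(PySem.Chars.isalnum q))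
                        then starts ++ [(pre.length : Int)] else starts
         let out' := if (match rest with | [] => true | r :: _ => !(PySem.Chars.isalnum r))
                     then out ++ pvEmit m starts' ((pre.length : Int) + 1) else out
         (starts', out')) := by
  by_cases hc : PySem.Chars.isalnum c
  · have h1 : (((pre.length : Int) == 0) ||
        !(PySem.Chars.isalnum (PySem.List.pyGetD (pre ++ c :: rest) ((pre.length : Int) - 1) ' '))) =
        (match pre.getLast? with | none => true | some q => !(PySem.Chars.isalnum q)) := by
      cases pre with
      | nil => simp
      | cons p0 ps =>
        have hne : (p0 :: ps) ≠ [] := by simp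
        have hlast : (p0 :: ps).getLast? = some ((p0 :: ps).getLast hne) := List.getLast?_eq_some_getLast (h := hne)
        have hidx : (((p0 :: ps).length : Int) - 1) = (((p0 :: ps).length - 1 : Nat) : Int) := by
          simp only [List.length_cons]; push_cast; omega
        rw [hidx, PySem.List.pyGetD_natCast]
        have hget : ((p0 :: ps) ++ c :: rest).getD ((p0 :: ps).length - 1) ' ' = (p0 :: ps).getLast hne := by
          rw [List.getD_eq_getElem?_getD,
            List.getElem?_append_left (by simp only [List.length_cons]; omega)]
          rw [List.getLast_eq_getElem]
          simp
          try rfl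
        rw [hget, hlast]
        have hz : ¬ (((ps.length : Nat) : Int) + 1 = 0) := by omega
        simp [hz]
    have h2 : (((pre.length : Int) + 1 == ((pre ++ c :: rest).length : Int)) ||
        !(PySem.Chars.isalnum (PySem.List.pyGetD (pre ++ c :: rest) ((pre.length : Int) + 1) ' '))) =
        (match rest with | [] => true | r :: _ => !(PySem.Chars.isalnum r)) := by
      cases rest with
      | nil => simp
      | cons r rest2 =>
        have hidx : ((pre.length : Int) + 1) = ((pre.length + 1 : Nat) : Int) := by push_cast; ring
        rw [hidx, PySem.List.pyGetD_natCast]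
        have hget : (pre ++ c :: r :: rest2).getD (pre.length + 1) ' ' = r := by
          rw [List.getD_eq_getElem?_getD, List.getElem?_append_right (by omega)]
          simp
        rw [hget]
        have hz2 : ¬ (((rest2.length : Nat) : Int) + 1 = 0) := by omega
        simp [hz2]
    simp only [pvStepA, hc, Bool.not_true, Bool.false_eq_true, if_false, h1, h2, pvEmit]
    cases rest <;> rfl
  · simp [pvStepA, hc]

-- Bridge: A's foldl over `enumerate` with global indexing equals pvLoopA
theorem pvFoldA_eq (m : Int) : ∀ (suf pre : List Char) (starts : List Int) (out : List (Int × Int)),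
    (PySem.List.enumerate suf (pre.length : Int)).foldl (pvStepA (pre ++ suf) m) (starts, out)
      = pvLoopA m pre.getLast? suf (pre.length : Int) starts out := by
  intro suf
  induction suf with
  | nil => intro pre starts out; simp [pvLoopA]
  | cons c rest ih =>
    intro pre starts out
    rw [PySem.List.enumerate_cons, List.foldl_cons, pvStepA_eq]
    have hre : pre ++ c :: rest = (pre ++ [c]) ++ rest := by simp
    have hlen : ((pre.length : Int) + 1) = (((pre ++ [c]).length : Nat) : Int) := by simp
    have hlast : (pre ++ [c]).getLast? = some c := by simp
    by_cases hc : PySem.Chars.isalnum c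
    · simp only [hc, Bool.not_true, Bool.false_eq_true, if_false]
      rw [hre, hlen, ih (pre ++ [c]), hlast]
      rw [show pvLoopA m pre.getLast? (c :: rest) ((pre.length : Int)) starts out =
          pvLoopA m (some c) rest ((pre.length : Int) + 1)
            (if (match pre.getLast? with | none => true | some q => !(PySem.Chars.isalnum q))
             then starts ++ [(pre.length : Int)] else starts)
            (if (match rest with | [] => true | r :: _ => !(PySem.Chars.isalnum r))
             then out ++ pvEmit m (if (match pre.getLast? with | none => true | some q => !(PySem.Chars.isalnum q))
                                   then starts ++ [(pre.length : Int)] else starts) ((pre.length : Int) + 1)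
             else out) from by simp [pvLoopA, hc]]
      rw [show (((pre ++ [c]).length : Nat) : Int) = (pre.length : Int) + 1 from by simp]
    · simp only [hc, Bool.not_false, if_true]
      rw [hre, hlen, ih (pre ++ [c]), hlast]
      rw [show pvLoopA m pre.getLast? (c :: rest) ((pre.length : Int)) starts out =
          pvLoopA m (some c) rest ((pre.length : Int) + 1) starts out from by simp [pvLoopA, hc]]
      rw [show (((pre ++ [c]).length : Nat) : Int) = (pre.length : Int) + 1 from by simp]

-- B's fold over enumerate(spans) equals pvEmitFrom
theorem pvFoldB_eq (m : Int) : ∀ (ws : List (Int × Int)) (BG starts : List Int)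
    (out0 : List (Int × Int)), BG = starts ++ ws.map (·.1) →
    (PySem.List.enumerate ws (starts.length : Int)).foldl
        (fun out p =>
          out ++ (PySem.List.slice (PySem.List.slice BG none (some (p.1 + 1)))
                    (some (-m)) none).map (fun s => (s, p.2.2))) out0
      = out0 ++ pvEmitFrom m starts ws := by
  intro ws
  induction ws with
  | nil => intro BG starts out0 _; simp [pvEmitFrom]
  | cons w ws' ih =>
    intro BG starts out0 hBG
    obtain ⟨b, e⟩ := w
    rw [PySem.List.enumerate_cons, List.foldl_cons]
    have htake : PySem.List.slice BG none (some ((starts.length : Int) + 1)) = starts ++ [b] := by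
      have : ((starts.length : Int) + 1) = ((starts.length + 1 : Nat) : Int) := by push_cast; ring
      rw [this, PySem.List.slice_to_natCast, hBG]
      simp [List.take_append]
    rw [htake]
    have hlen : ((starts.length : Int) + 1) = (((starts ++ [b]).length : Nat) : Int) := by simp
    rw [hlen, ih BG (starts ++ [b]) _ (by simp [hBG])]
    simp [pvEmitFrom, pvEmit, List.append_assoc]

-- ===== VERDICT (by name: the statement is the Claim_ definition above) =====
theorem get_all_spans_spec : Claim_equal_get_all_spans := by
  intro text m _
  unfold Spec_get_all_spans
  have hA := pvFoldA_eq m text.toList [] [] []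
  simp only [List.nil_append, List.length_nil, Nat.cast_zero, List.getLast?_nil] at hA
  have hB := pvFoldB_eq m (pvWordsB text.toList 0) ((pvWordsB text.toList 0).map (·.1)) [] []
    (by simp)
  simp only [List.length_nil, Nat.cast_zero, List.nil_append] at hB
  simp only [get_all_spans, get_all_spans_alt]
  rw [hA, hB, pvLoopA_eq]
  simp [pvRHS]
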